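-- pv_equiv track=rewrite | github.com/NanubalaSravani/HUNGMAN-GAME | code1.py | count_closed_figures
-- ===== SOURCE A (Python) =====
-- def count_closed_figures(segments):
--     # Step 1: Create a graph where each point (x, y) is a unique node.
--     graph = {}
--     for segment in segments:
--         x1, y1, x2, y2 = segment
--         if (x1, y1) not in graph:
--             graph[(x1, y1)] = []
--         if (x2, y2) not in graph:
--             graph[(x2, y2)] = []
--
--         # Add edges in both directions as it's an undirected graph.
--         graph[(x1, y1)].append((x2, y2))
--         graph[(x2, y2)].append((x1, y1))
--
--     # Step 2: Count cycles (closed figures) using DFS/BFS.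
--     visited = set()
--     closed_figures_count = 0
--
--     def dfs(node, parent, path):
--         # Detect cycle if we revisit a node that is in the current path but is not the parent.
--         if node in visited:
--             if node in path:
--                 # A cycle is found.
--                 return True
--             return False
--
--         visited.add(node)
--         path.add(node)
--
--         # Traverse neighbors
--         cycle_found = False
--         for neighbor in graph[node]:
--             if neighbor == parent:
--                 continue
--             if dfs(neighbor, node, path):
--                 cycle_found = True
--
--         path.remove(node)
--         return cycle_found
--
--     # Iterate over all nodes in the graph and apply DFS to count unique cycles.
--     for node in graph:
--         if node not in visited:
--             if dfs(node, None, set()):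
--                 closed_figures_count += 1
--
--     return closed_figures_count
-- ===== SOURCE B (Python) =====
-- def count_closed_figures(segments):
--     # Iterative rewrite: builds the same point graph, then walks each component
--     # with an explicit frame stack instead of recursion (no recursion limit).
--     graph = {}
--     for x1, y1, x2, y2 in segments:
--         graph.setdefault((x1, y1), [])
--         graph.setdefault((x2, y2), [])
--         graph[(x1, y1)].append((x2, y2))
--         graph[(x2, y2)].append((x1, y1))
--
--     visited = set()
--     count = 0
--     for start in graph:
--         if start not in visited:
--             if _explore(graph, visited, start):
--                 count += 1
--     return count
--
--
-- def _explore(graph, visited, start):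
--     """Depth-first walk from `start` over an explicit stack of frames
--     [node, parent, pending neighbours, cycle flag]; returns True iff the
--     component of `start` contains a cycle."""
--     visited.add(start)
--     onpath = {start}
--     stack = [[start, None, list(graph[start]), False]]
--     result = False
--     while stack:
--         node, parent, pending, flag = stack[-1]
--         if pending:
--             nb = pending.pop(0)
--             if nb == parent:
--                 continue
--             if nb in visited:
--                 if nb in onpath:
--                     stack[-1][3] = True
--                 continue
--             visited.add(nb)
--             onpath.add(nb)
--             stack.append([nb, node, list(graph[nb]), False])
--         else:
--             stack.pop()
--             onpath.discard(node)
--             if stack: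
--                 stack[-1][3] = stack[-1][3] or flag
--             else:
--                 result = flag
--     return result
-- ===== Notes on version B (the rewrite author's own statement) =====
-- stated objective: alternative
-- what changed: Replaces A's recursive dfs (call-stack recursion over a closure-shared visited set and a mutable path set) by an iterative depth-first walk over an explicit stack of [node, parent, pending-neighbours, cycle-flag] frames with an explicit on-path set, so no recursion is used and deep components cannot hit Python's recursion limit.
import Mathlib
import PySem

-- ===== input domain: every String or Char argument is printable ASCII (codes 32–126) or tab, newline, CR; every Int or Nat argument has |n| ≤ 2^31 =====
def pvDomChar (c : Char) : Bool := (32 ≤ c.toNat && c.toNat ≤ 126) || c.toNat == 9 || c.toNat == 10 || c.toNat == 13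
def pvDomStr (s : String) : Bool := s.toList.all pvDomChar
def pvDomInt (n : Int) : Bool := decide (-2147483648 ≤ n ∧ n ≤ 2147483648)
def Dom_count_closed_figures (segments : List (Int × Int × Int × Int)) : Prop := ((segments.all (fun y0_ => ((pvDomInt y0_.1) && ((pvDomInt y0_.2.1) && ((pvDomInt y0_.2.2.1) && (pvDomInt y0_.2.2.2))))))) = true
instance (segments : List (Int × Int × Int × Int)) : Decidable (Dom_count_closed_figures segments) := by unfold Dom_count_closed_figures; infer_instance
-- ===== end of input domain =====

-- B replaces A's recursive DFS by an iterative walk over an explicit frame stack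
-- (objective: alternative decomposition — no recursion, so no call-stack depth limit);
-- same return value, A's closure-mutated `visited`/`path` sets become threaded state.

-- ===== PORT A =====

-- Step 1 of A: the adjacency dict over endpoint nodes (both directions appended).
def buildGraphA (segments : List (Int × Int × Int × Int)) :
    PySem.Dict (Int × Int) (List (Int × Int)) :=
  segments.foldl (fun g s =>
    let p1 : Int × Int := (s.1, s.2.1)
    let p2 : Int × Int := (s.2.2.1, s.2.2.2)
    let g := if g.contains p1 then g else g.insert p1 []
    let g := if g.contains p2 then g else g.insert p2 []
    let g := g.modify p1 [] (fun l => l ++ [p2])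
    g.modify p2 [] (fun l => l ++ [p1])) PySem.Dict.empty

-- A's recursive dfs. `visited` is threaded (Python mutates one shared set); `path` is
-- only passed down: Python's final `path.remove(node)` restores the caller's set, so the
-- caller's own `path` value is already the set after that removal. `graph[node]` is ported
-- as getD node [] (every node reached is a key of the built graph, so Python never raises).
-- The fuel argument only makes the recursion total; the top-level call passes
-- 2*len(segments)+2, which exceeds the recursion depth (≤ number of nodes + 1).
mutual
def dfsA (graph : PySem.Dict (Int × Int) (List (Int × Int))) (fuel : Nat)
    (node : Int × Int) (parent : Option (Int × Int))
    (visited path : PySem.Set (Int × Int)) : PySem.Set (Int × Int) × Bool :=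
  match fuel with
  | 0 => (visited, false)  -- fuel exhausted; never reached from the port's top level
  | fuel + 1 =>
    if PySem.Set.contains visited node then (visited, PySem.Set.contains path node)
    else
      goA graph fuel (graph.getD node []) node parent
        (PySem.Set.add visited node) (PySem.Set.add path node) false
termination_by (fuel, 0)
-- the `for neighbor in graph[node]` loop, threading (visited, cycle_found)
def goA (graph : PySem.Dict (Int × Int) (List (Int × Int))) (fuel : Nat)
    (ns : List (Int × Int)) (node : Int × Int) (parent : Option (Int × Int))
    (visited path : PySem.Set (Int × Int)) (flag : Bool) : PySem.Set (Int × Int) × Bool :=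
  match ns with
  | [] => (visited, flag)
  | nb :: rest =>
    if some nb = parent then goA graph fuel rest node parent visited path flag
    else
      let r := dfsA graph fuel nb (some node) visited path
      goA graph fuel rest node parent r.1 path (flag || r.2)
termination_by (fuel, ns.length + 1)
end

def count_closed_figures (segments : List (Int × Int × Int × Int)) : Int :=
  let graph := buildGraphA segments
  (graph.keys.foldl (fun (acc : PySem.Set (Int × Int) × Int) node =>
      if PySem.Set.contains acc.1 node then acc
      else
        let r := dfsA graph (2 * segments.length + 2) node none acc.1 PySem.Set.empty
        (r.1, if r.2 then acc.2 + 1 else acc.2)) (PySem.Set.empty, 0)).2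

-- ===== PORT B =====

-- same adjacency dict, built with setdefault + append
def buildGraphB (segments : List (Int × Int × Int × Int)) :
    PySem.Dict (Int × Int) (List (Int × Int)) :=
  segments.foldl (fun g s =>
    let p1 : Int × Int := (s.1, s.2.1)
    let p2 : Int × Int := (s.2.2.1, s.2.2.2)
    let g := g.setdefault p1 []
    let g := g.setdefault p2 []
    let g := g.modify p1 [] (fun l => l ++ [p2])
    g.modify p2 [] (fun l => l ++ [p1])) PySem.Dict.empty

-- number of graph keys not yet visited (termination measure of the stack loop)
def unvis (graph : PySem.Dict (Int × Int) (List (Int × Int)))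
    (visited : PySem.Set (Int × Int)) : Nat :=
  graph.keys.countP (fun k => !PySem.Set.contains visited k)


-- countP strictly drops when one satisfied element stops satisfying (used for termination)
theorem pvCountP_lt {α : Type} (l : List α) (p q : α → Bool) (x : α) (hx : x ∈ l)
    (h : ∀ a, p a = true → q a = true) (h2 : q x = true) (h3 : p x = false) :
    l.countP p < l.countP q := by
  induction l with
  | nil => cases hx
  | cons a t ih =>
    have hmono : t.countP p ≤ t.countP q := List.countP_mono_left (fun a _ => h a)
    rcases List.mem_cons.mp hx with rfl | hx'
    · simp [h3, h2]; omega
    · have := ih hx'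
      have hb : (if p a then 1 else 0) ≤ (if q a then 1 else 0) := by
        by_cases hp : p a = true
        · simp [hp, h a hp]
        · simp [hp]
      simp [List.countP_cons]
      omega

theorem pvContains_false (s : PySem.Set (Int × Int)) (x : Int × Int) :
    PySem.Set.contains s x = false ↔ x ∉ s := by
  constructor
  · intro h hm
    rw [(PySem.Set.contains_iff s x).mpr hm] at h
    cases h
  · intro h
    cases hc : PySem.Set.contains s x with
    | false => rfl
    | true => exact absurd ((PySem.Set.contains_iff s x).mp hc) h

theorem pvUnvis_add_lt (graph : PySem.Dict (Int × Int) (List (Int × Int)))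
    (v : PySem.Set (Int × Int)) (x : Int × Int) (hk : x ∈ graph.keys)
    (hv : ¬ PySem.Set.contains v x = true) :
    unvis graph (PySem.Set.add v x) < unvis graph v := by
  apply pvCountP_lt _ _ _ x hk
  · intro a ha
    simp only [Bool.not_eq_true'] at ha ⊢
    rw [pvContains_false] at ha ⊢
    exact fun hm => ha ((PySem.Set.mem_add v x a).mpr (Or.inl hm))
  · simp only [Bool.not_eq_true']
    cases hc : PySem.Set.contains v x with
    | false => rfl
    | true => exact absurd hc hv
  · have hx : PySem.Set.contains (PySem.Set.add v x) x = true :=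
      (PySem.Set.contains_iff _ x).mpr ((PySem.Set.mem_add v x x).mpr (Or.inr rfl))
    simp

theorem pvUnvis_add_eq (graph : PySem.Dict (Int × Int) (List (Int × Int)))
    (v : PySem.Set (Int × Int)) (x : Int × Int) (hk : x ∉ graph.keys) :
    unvis graph (PySem.Set.add v x) = unvis graph v := by
  apply List.countP_congr
  intro a ha
  have hne : a ≠ x := fun he => hk (he ▸ ha)
  have hiff : (a ∈ PySem.Set.add v x) ↔ a ∈ v := by
    rw [PySem.Set.mem_add]
    exact ⟨fun h => h.resolve_right hne, Or.inl⟩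
  cases hva : PySem.Set.contains v a with
  | true =>
    rw [(PySem.Set.contains_iff _ a).mpr (hiff.mpr ((PySem.Set.contains_iff v a).mp hva))]
  | false =>
    rw [(pvContains_false _ a).mpr (fun hm => ((pvContains_false v a).mp hva) (hiff.mp hm))]

-- a frame of B's explicit stack: [node, parent, pending neighbours, cycle flag]
abbrev FrameB := (Int × Int) × Option (Int × Int) × List (Int × Int) × Bool

def pendSum (stack : List FrameB) : Nat := (stack.map (fun f => f.2.2.1.length)).sum

-- B's while loop. Returns (visited, result). `graph[nb]` is again getD (keys only).
def runB (graph : PySem.Dict (Int × Int) (List (Int × Int))) :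
    List FrameB → PySem.Set (Int × Int) → PySem.Set (Int × Int) →
    PySem.Set (Int × Int) × Bool
  | [], visited, _ => (visited, false)  -- `result` still False (stack starts non-empty)
  | (node, parent, pending, flag) :: rest, visited, onpath =>
    match pending with
    | [] =>
      let onpath' := PySem.Set.discard onpath node
      match rest with
      | [] => (visited, flag)  -- last frame popped: result = flag, loop ends
      | (n2, p2, pd2, f2) :: rs => runB graph ((n2, p2, pd2, f2 || flag) :: rs) visited onpath'
    | nb :: pending' =>
      if some nb = parent then
        runB graph ((node, parent, pending', flag) :: rest) visited onpath
      else if PySem.Set.contains visited nb then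
        runB graph ((node, parent, pending', flag || PySem.Set.contains onpath nb) :: rest)
          visited onpath
      else
        runB graph ((nb, node, graph.getD nb [], false) :: (node, parent, pending', flag) :: rest)
          (PySem.Set.add visited nb) (PySem.Set.add onpath nb)
termination_by stack visited _ => (unvis graph visited, 2 * pendSum stack + stack.length)
decreasing_by
  all_goals first
  | (apply Prod.Lex.right
     simp only [pendSum, List.map_cons, List.sum_cons, List.length_cons]
     omega)
  | (rename_i hvis
     by_cases hk : nb ∈ graph.keys
     · exact Prod.Lex.left _ _ (pvUnvis_add_lt graph visited nb hk hvis)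
     · have hd : graph.getD nb [] = [] := by
         apply PySem.Dict.getD_of_not_contains
         cases hc : graph.contains nb with
         | false => rfl
         | true => exact absurd ((PySem.Dict.contains_iff_mem_keys graph nb).mp hc) hk
       rw [pvUnvis_add_eq graph visited nb hk]
       apply Prod.Lex.right
       simp only [pendSum, hd, List.map_cons, List.sum_cons, List.length_cons, List.length_nil]
       omega)

def exploreB (graph : PySem.Dict (Int × Int) (List (Int × Int)))
    (visited : PySem.Set (Int × Int)) (start : Int × Int) :
    PySem.Set (Int × Int) × Bool :=
  runB graph [(start, none, graph.getD start [], false)]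
    (PySem.Set.add visited start) (PySem.Set.add PySem.Set.empty start)

def count_closed_figures_alt (segments : List (Int × Int × Int × Int)) : Int :=
  let graph := buildGraphB segments
  (graph.keys.foldl (fun (acc : PySem.Set (Int × Int) × Int) start =>
      if PySem.Set.contains acc.1 start then acc
      else
        let r := exploreB graph acc.1 start
        (r.1, if r.2 then acc.2 + 1 else acc.2)) (PySem.Set.empty, 0)).2

-- ===== PRECONDITION & SPEC =====
def Spec_count_closed_figures (segments : List (Int × Int × Int × Int)) (out : Int) : Prop := out = count_closed_figures_alt segments
instance (segments : List (Int × Int × Int × Int)) (out : Int) : Decidable (Spec_count_closed_figures segments out) := by unfold Spec_count_closed_figures; infer_instance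

-- ===== CLAIM (what is proved, stated in full; the proofs are below) =====
def Claim_equal_count_closed_figures : Prop := ∀ (segments : List (Int × Int × Int × Int)), Dom_count_closed_figures segments → Spec_count_closed_figures segments (count_closed_figures segments)

-- ===== LEMMAS AND PROOFS =====

-- d.setdefault k [] is A's "if k not in d: d[k] = []"
theorem pvSetdefault_eq (g : PySem.Dict (Int × Int) (List (Int × Int))) (p : Int × Int) :
    g.setdefault p [] = if g.contains p then g else g.insert p [] := by
  simp only [PySem.Dict.setdefault, PySem.Dict.insert]
  split <;> simp_all

-- the two ports build the same adjacency dict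
theorem pvBuild_eq (segments : List (Int × Int × Int × Int)) :
    buildGraphB segments = buildGraphA segments := by
  unfold buildGraphA buildGraphB
  apply List.foldl_ext
  intro g s _hs
  simp only [pvSetdefault_eq]

theorem pvAddDiscard (s : PySem.Set (Int × Int)) (x : Int × Int) (h : x ∉ s) :
    PySem.Set.discard (PySem.Set.add s x) x = s := by
  simp [PySem.Set.discard, PySem.Set.add_of_not_mem h]
  intro a b hab e
  exact h (e ▸ hab)

theorem pvContains_add_of (v : PySem.Set (Int × Int)) (x y : Int × Int)
    (h : PySem.Set.contains v x = true) :
    PySem.Set.contains (PySem.Set.add v y) x = true :=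
  (PySem.Set.contains_iff _ x).mpr
    ((PySem.Set.mem_add v y x).mpr (Or.inl ((PySem.Set.contains_iff v x).mp h)))

theorem pvUnvis_mono (graph : PySem.Dict (Int × Int) (List (Int × Int)))
    (v w : PySem.Set (Int × Int))
    (h : ∀ x, PySem.Set.contains v x = true → PySem.Set.contains w x = true) :
    unvis graph w ≤ unvis graph v := by
  apply List.countP_mono_left
  intro a _ ha
  simp only [Bool.not_eq_true'] at ha ⊢
  cases hv : PySem.Set.contains v a with
  | false => rfl
  | true => rw [h a hv] at ha; cases ha

-- dfs only ever adds to `visited`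
theorem pvMono (graph : PySem.Dict (Int × Int) (List (Int × Int))) :
    ∀ fuel : Nat,
      (∀ node parent v path x, PySem.Set.contains v x = true →
        PySem.Set.contains (dfsA graph fuel node parent v path).1 x = true) ∧
      (∀ ns node parent v path flag x, PySem.Set.contains v x = true →
        PySem.Set.contains (goA graph fuel ns node parent v path flag).1 x = true) := by
  intro fuel
  induction fuel with
  | zero =>
    constructor
    · intro node parent v path x h
      rw [dfsA]
      exact h
    · intro ns
      induction ns with
      | nil => intro node parent v path flag x h; rw [goA]; exact h
      | cons nb rest ih =>
        intro node parent v path flag x h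
        rw [goA]
        by_cases hp : some nb = parent
        · simp only [hp]
          exact ih node parent v path flag x h
        · simp only [if_neg hp]
          exact ih node parent _ path _ x (by rw [dfsA]; exact h)
  | succ f IH =>
    have hdfs : ∀ node parent v path x, PySem.Set.contains v x = true →
        PySem.Set.contains (dfsA graph (f + 1) node parent v path).1 x = true := by
      intro node parent v path x h
      rw [dfsA]
      by_cases hv : PySem.Set.contains v node = true
      · simp only [hv]
        exact h
      · simp only [if_neg hv]
        exact IH.2 _ node parent _ _ false x (pvContains_add_of v x node h)
    refine ⟨hdfs, ?_⟩
    intro ns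
    induction ns with
    | nil => intro node parent v path flag x h; rw [goA]; exact h
    | cons nb rest ih =>
      intro node parent v path flag x h
      rw [goA]
      by_cases hp : some nb = parent
      · simp only [hp]
        exact ih node parent v path flag x h
      · simp only [if_neg hp]
        exact ih node parent _ path _ x (hdfs nb (some node) v path x h)

-- popping the top frame: merge its flag into the next frame (or finish)
def popCont (graph : PySem.Dict (Int × Int) (List (Int × Int))) (rest : List FrameB)
    (v onpath' : PySem.Set (Int × Int)) (f : Bool) : PySem.Set (Int × Int) × Bool :=
  match rest with
  | [] => (v, f)
  | (n2, p2, pd2, f2) :: rs => runB graph ((n2, p2, pd2, f2 || f) :: rs) v onpath'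

-- the closure property of the built graph: every listed neighbour is a key
def GraphClosed (graph : PySem.Dict (Int × Int) (List (Int × Int))) : Prop :=
  ∀ k x, x ∈ graph.getD k [] → x ∈ graph.keys

-- ensuring a key: A's "if p not in graph: graph[p] = []"
theorem pvEnsureClosed (g : PySem.Dict (Int × Int) (List (Int × Int))) (p : Int × Int)
    (hg : GraphClosed g) :
    GraphClosed (if g.contains p then g else g.insert p []) := by
  by_cases hc : g.contains p = true
  · rw [if_pos hc]; exact hg
  · rw [if_neg hc]
    intro k x hx
    rw [PySem.Dict.getD_insert] at hx
    split at hx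
    · cases hx
    · exact (PySem.Dict.mem_keys_insert _ _ _ _).mpr (Or.inr (hg k x hx))

theorem pvEnsureMem (g : PySem.Dict (Int × Int) (List (Int × Int))) (p : Int × Int) :
    p ∈ (if g.contains p then g else g.insert p []).keys ∧
    (∀ y, y ∈ g.keys → y ∈ (if g.contains p then g else g.insert p []).keys) := by
  by_cases hc : g.contains p = true
  · rw [if_pos hc]
    exact ⟨(PySem.Dict.contains_iff_mem_keys g p).mp hc, fun y hy => hy⟩
  · rw [if_neg hc]
    exact ⟨(PySem.Dict.mem_keys_insert _ _ _ _).mpr (Or.inl rfl),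
      fun y hy => (PySem.Dict.mem_keys_insert _ _ _ _).mpr (Or.inr hy)⟩

theorem pvEnsureLen (g : PySem.Dict (Int × Int) (List (Int × Int))) (p : Int × Int) :
    (if g.contains p then g else g.insert p []).keys.length ≤ g.keys.length + 1 := by
  by_cases hc : g.contains p = true
  · rw [if_pos hc]; omega
  · rw [if_neg hc]
    rw [PySem.Dict.keys_insert_of_not_contains g [] (by simp [hc])]
    simp

-- appending an existing key to an adjacency list keeps the graph closed
theorem pvClosedModify (g : PySem.Dict (Int × Int) (List (Int × Int))) (p q : Int × Int)
    (hg : GraphClosed g) (hq : q ∈ g.keys) :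
    GraphClosed (g.modify p [] (fun l => l ++ [q])) := by
  intro k x hx
  rw [PySem.Dict.keys_modify]
  rw [PySem.Dict.getD_modify] at hx
  split at hx
  · rcases List.mem_append.mp hx with hx' | hx'
    · exact (PySem.Dict.mem_keys_insert _ _ _ _).mpr (Or.inr (hg p x hx'))
    · simp only [List.mem_singleton] at hx'
      exact (PySem.Dict.mem_keys_insert _ _ _ _).mpr (Or.inr (hx' ▸ hq))
  · exact (PySem.Dict.mem_keys_insert _ _ _ _).mpr (Or.inr (hg k x hx))

-- one build step preserves closedness
theorem pvStepClosed (g : PySem.Dict (Int × Int) (List (Int × Int))) (p1 p2 : Int × Int)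
    (hg : GraphClosed g) :
    GraphClosed
      (let g1 := if g.contains p1 then g else g.insert p1 []
       let g2 := if g1.contains p2 then g1 else g1.insert p2 []
       let g3 := g2.modify p1 [] (fun l => l ++ [p2])
       g3.modify p2 [] (fun l => l ++ [p1])) := by
  obtain ⟨hp1, hk1⟩ := pvEnsureMem g p1
  obtain ⟨hp2, hk2⟩ := pvEnsureMem (if g.contains p1 then g else g.insert p1 []) p2
  have hC2 := pvEnsureClosed (if g.contains p1 then g else g.insert p1 []) p2
    (pvEnsureClosed g p1 hg)
  refine pvClosedModify _ p2 p1 (pvClosedModify _ p1 p2 hC2 hp2) ?_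
  rw [PySem.Dict.keys_modify]
  exact (PySem.Dict.mem_keys_insert _ _ _ _).mpr (Or.inr (hk2 p1 hp1))

-- one build step adds at most two keys
theorem pvStepLen (g : PySem.Dict (Int × Int) (List (Int × Int))) (s : Int × Int × Int × Int) :
    ((let p1 : Int × Int := (s.1, s.2.1)
      let p2 : Int × Int := (s.2.2.1, s.2.2.2)
      let g := if g.contains p1 then g else g.insert p1 []
      let g := if g.contains p2 then g else g.insert p2 []
      let g := g.modify p1 [] (fun l => l ++ [p2])
      g.modify p2 [] (fun l => l ++ [p1])).keys).length ≤ g.keys.length + 2 := by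
  obtain ⟨hp1, hk1⟩ := pvEnsureMem g (s.1, s.2.1)
  obtain ⟨hp2, hk2⟩ := pvEnsureMem
    (if g.contains (s.1, s.2.1) then g else g.insert (s.1, s.2.1) []) (s.2.2.1, s.2.2.2)
  have hkeys3 : ((if (if g.contains (s.1, s.2.1) then g else g.insert (s.1, s.2.1) []).contains (s.2.2.1, s.2.2.2)
        then (if g.contains (s.1, s.2.1) then g else g.insert (s.1, s.2.1) [])
        else (if g.contains (s.1, s.2.1) then g else g.insert (s.1, s.2.1) []).insert (s.2.2.1, s.2.2.2) []).modify (s.1, s.2.1) []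
          (fun l => l ++ [(s.2.2.1, s.2.2.2)])).keys =
      (if (if g.contains (s.1, s.2.1) then g else g.insert (s.1, s.2.1) []).contains (s.2.2.1, s.2.2.2)
        then (if g.contains (s.1, s.2.1) then g else g.insert (s.1, s.2.1) [])
        else (if g.contains (s.1, s.2.1) then g else g.insert (s.1, s.2.1) []).insert (s.2.2.1, s.2.2.2) []).keys := by
    rw [PySem.Dict.keys_modify,
      PySem.Dict.keys_insert_of_contains _ _
        ((PySem.Dict.contains_iff_mem_keys _ _).mpr (hk2 (s.1, s.2.1) hp1))]
  show ((((if (if g.contains (s.1, s.2.1) then g else g.insert (s.1, s.2.1) []).contains (s.2.2.1, s.2.2.2)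
        then (if g.contains (s.1, s.2.1) then g else g.insert (s.1, s.2.1) [])
        else (if g.contains (s.1, s.2.1) then g else g.insert (s.1, s.2.1) []).insert (s.2.2.1, s.2.2.2) []).modify (s.1, s.2.1) []
          (fun l => l ++ [(s.2.2.1, s.2.2.2)])).modify (s.2.2.1, s.2.2.2) []
          (fun l => l ++ [(s.1, s.2.1)])).keys).length ≤
      g.keys.length + 2
  rw [PySem.Dict.keys_modify,
    PySem.Dict.keys_insert_of_contains _ _
      (by rw [PySem.Dict.contains_modify]
          rw [(PySem.Dict.contains_iff_mem_keys _ _).mpr hp2]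
          simp),
    hkeys3]
  have h2 := pvEnsureLen (if g.contains (s.1, s.2.1) then g else g.insert (s.1, s.2.1) []) (s.2.2.1, s.2.2.2)
  have h1 := pvEnsureLen g (s.1, s.2.1)
  omega

theorem pvBuildClosed (segments : List (Int × Int × Int × Int)) :
    GraphClosed (buildGraphA segments) := by
  unfold buildGraphA
  have aux : ∀ (l : List (Int × Int × Int × Int)) (g : PySem.Dict (Int × Int) (List (Int × Int))),
      GraphClosed g → GraphClosed (l.foldl (fun g s =>
        let p1 : Int × Int := (s.1, s.2.1)
        let p2 : Int × Int := (s.2.2.1, s.2.2.2)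
        let g := if g.contains p1 then g else g.insert p1 []
        let g := if g.contains p2 then g else g.insert p2 []
        let g := g.modify p1 [] (fun l => l ++ [p2])
        g.modify p2 [] (fun l => l ++ [p1])) g) := by
    intro l
    induction l with
    | nil => intro g hg; exact hg
    | cons s t ih =>
      intro g hg
      exact ih _ (pvStepClosed g (s.1, s.2.1) (s.2.2.1, s.2.2.2) hg)
  exact aux segments PySem.Dict.empty (fun k x hx => by
    rw [PySem.Dict.getD_empty] at hx; cases hx)

theorem pvBuildLen (segments : List (Int × Int × Int × Int)) :
    (buildGraphA segments).keys.length ≤ 2 * segments.length := by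
  unfold buildGraphA
  have aux : ∀ (l : List (Int × Int × Int × Int)) (g : PySem.Dict (Int × Int) (List (Int × Int))),
      ((l.foldl (fun g s =>
        let p1 : Int × Int := (s.1, s.2.1)
        let p2 : Int × Int := (s.2.2.1, s.2.2.2)
        let g := if g.contains p1 then g else g.insert p1 []
        let g := if g.contains p2 then g else g.insert p2 []
        let g := g.modify p1 [] (fun l => l ++ [p2])
        g.modify p2 [] (fun l => l ++ [p1])) g).keys).length ≤ g.keys.length + 2 * l.length := by
    intro l
    induction l with
    | nil => intro g; simp
    | cons s t ih =>
      intro g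
      rw [List.foldl_cons, List.length_cons]
      exact le_trans (ih _)
        (le_trans (Nat.add_le_add_right (pvStepLen g s) (2 * t.length)) (by omega))
  have := aux segments PySem.Dict.empty
  simp [PySem.Dict.keys_empty] at this
  omega

-- the main simulation: running B's machine on a stack whose top frame still has
-- `pend` to process equals finishing that frame with A's neighbour loop, then popping
theorem pvMain (graph : PySem.Dict (Int × Int) (List (Int × Int)))
    (hcl : GraphClosed graph) :
    ∀ u : Nat, ∀ (pend : List (Int × Int)) (fuel : Nat) (node : Int × Int)
      (parent : Option (Int × Int)) (flag : Bool) (rest : List FrameB)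
      (visited onpath : PySem.Set (Int × Int)),
      unvis graph visited = u →
      (∀ x, PySem.Set.contains onpath x = true → PySem.Set.contains visited x = true) →
      (∀ x ∈ pend, x ∈ graph.keys) →
      unvis graph visited + 1 ≤ fuel →
      runB graph ((node, parent, pend, flag) :: rest) visited onpath =
        popCont graph rest (goA graph fuel pend node parent visited onpath flag).1
          (PySem.Set.discard onpath node)
          (goA graph fuel pend node parent visited onpath flag).2 := by
  intro u
  induction u using Nat.strong_induction_on with
  | _ u IHu =>
  intro pend
  induction pend with
  | nil =>
    intro fuel node parent flag rest visited onpath hu hsub hpend hfuel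
    cases rest with
    | nil => rw [runB, goA]; rfl
    | cons fr rs => obtain ⟨n2, p2, pd2, f2⟩ := fr; rw [runB, goA]; rfl
  | cons nb pend' IHpend =>
    intro fuel node parent flag rest visited onpath hu hsub hpend hfuel
    obtain ⟨f, rfl⟩ : ∃ f, fuel = f + 1 := ⟨fuel - 1, by omega⟩
    rw [runB, goA]
    by_cases hp : some nb = parent
    · simp only [hp]
      exact IHpend (f + 1) node parent flag rest visited onpath hu hsub
        (fun x hx => hpend x (List.mem_cons_of_mem nb hx)) hfuel
    · simp only [if_neg hp]
      by_cases hv : PySem.Set.contains visited nb = true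
      · simp only [hv]
        rw [dfsA]
        simp only [hv]
        exact IHpend (f + 1) node parent (flag || PySem.Set.contains onpath nb) rest visited
          onpath hu hsub (fun x hx => hpend x (List.mem_cons_of_mem nb hx)) hfuel
      · simp only [if_neg hv]
        rw [dfsA]
        simp only [if_neg hv]
        have hnbk : nb ∈ graph.keys := hpend nb List.mem_cons_self
        have hlt : unvis graph (PySem.Set.add visited nb) < u :=
          hu ▸ pvUnvis_add_lt graph visited nb hnbk hv
        have hnbop : nb ∉ onpath := fun hm =>
          hv ((hsub nb ((PySem.Set.contains_iff onpath nb).mpr hm)))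
        have h1 := IHu (unvis graph (PySem.Set.add visited nb)) hlt
          (graph.getD nb []) f nb (some node) false
          ((node, parent, pend', flag) :: rest)
          (PySem.Set.add visited nb) (PySem.Set.add onpath nb) rfl
          (fun x hx => by
            rcases (PySem.Set.mem_add onpath nb x).mp ((PySem.Set.contains_iff _ x).mp hx) with hxo | rfl
            · exact pvContains_add_of visited x nb (hsub x ((PySem.Set.contains_iff onpath x).mpr hxo))
            · exact (PySem.Set.contains_iff _ x).mpr ((PySem.Set.mem_add visited x x).mpr (Or.inr rfl)))
          (fun x hx => hcl nb x hx)
          (by omega)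
        rw [h1]
        set r := goA graph f (graph.getD nb []) nb (some node)
          (PySem.Set.add visited nb) (PySem.Set.add onpath nb) false with hr
        rw [pvAddDiscard onpath nb hnbop]
        show runB graph ((node, parent, pend', flag || r.2) :: rest) r.1 onpath = _
        have hmono : ∀ x, PySem.Set.contains (PySem.Set.add visited nb) x = true →
            PySem.Set.contains r.1 x = true := fun x hx =>
          (pvMono graph f).2 (graph.getD nb []) nb (some node)
            (PySem.Set.add visited nb) (PySem.Set.add onpath nb) false x hx
        have hle : unvis graph r.1 ≤ unvis graph (PySem.Set.add visited nb) :=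
          pvUnvis_mono graph _ _ hmono
        have h2 := IHu (unvis graph r.1) (by omega) pend' (f + 1) node parent
          (flag || r.2) rest r.1 onpath rfl
          (fun x hx => hmono x (pvContains_add_of visited x nb (hsub x hx)))
          (fun x hx => hpend x (List.mem_cons_of_mem nb hx))
          (by omega)
        rw [h2]

-- one outer-loop step: B's stack walk from `start` is A's dfs call
theorem pvExpl (graph : PySem.Dict (Int × Int) (List (Int × Int)))
    (hcl : GraphClosed graph) (visited : PySem.Set (Int × Int)) (start : Int × Int)
    (hk : start ∈ graph.keys) (hsv : ¬ PySem.Set.contains visited start = true)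
    (F : Nat) (hF : unvis graph visited + 1 ≤ F) :
    exploreB graph visited start = dfsA graph F start none visited PySem.Set.empty := by
  obtain ⟨f, rfl⟩ : ∃ f, F = f + 1 := ⟨F - 1, by omega⟩
  have hlt := pvUnvis_add_lt graph visited start hk hsv
  rw [dfsA]
  simp only [if_neg hsv]
  unfold exploreB
  rw [pvMain graph hcl (unvis graph (PySem.Set.add visited start))
      (graph.getD start []) f start none false []
      (PySem.Set.add visited start) (PySem.Set.add PySem.Set.empty start) rfl
      (fun x hx => by
        rcases (PySem.Set.mem_add PySem.Set.empty start x).mp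
            ((PySem.Set.contains_iff _ x).mp hx) with h0 | rfl
        · exact absurd h0 (by simp [PySem.Set.empty])
        · exact (PySem.Set.contains_iff _ x).mpr ((PySem.Set.mem_add visited x x).mpr (Or.inr rfl)))
      (fun x hx => hcl start x hx)
      (by omega)]
  rfl

-- the outer loops agree key by key
theorem pvFold (graph : PySem.Dict (Int × Int) (List (Int × Int)))
    (hcl : GraphClosed graph) (F : Nat) (hF : graph.keys.length + 1 ≤ F) :
    ∀ (l : List (Int × Int)), (∀ x ∈ l, x ∈ graph.keys) →
    ∀ acc : PySem.Set (Int × Int) × Int,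
      l.foldl (fun acc node =>
        if PySem.Set.contains acc.1 node then acc
        else
          let r := dfsA graph F node none acc.1 PySem.Set.empty
          (r.1, if r.2 then acc.2 + 1 else acc.2)) acc =
      l.foldl (fun acc start =>
        if PySem.Set.contains acc.1 start then acc
        else
          let r := exploreB graph acc.1 start
          (r.1, if r.2 then acc.2 + 1 else acc.2)) acc := by
  intro l hl
  induction l with
  | nil => intro acc; rfl
  | cons x t ih =>
    intro acc
    simp only [List.foldl_cons]
    by_cases hx : PySem.Set.contains acc.1 x = true
    · simp only [hx]
      exact ih (fun y hy => hl y (List.mem_cons_of_mem x hy)) acc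
    · simp only [if_neg hx]
      rw [pvExpl graph hcl acc.1 x (hl x (List.mem_cons_self)) hx F
        (le_trans (by have := List.countP_le_length (l := graph.keys) (p := fun k => !PySem.Set.contains acc.1 k); unfold unvis; omega) hF)]
      exact ih (fun y hy => hl y (List.mem_cons_of_mem x hy)) _

-- ===== VERDICT (by name: the statement is the Claim_ definition above) =====
theorem count_closed_figures_spec : Claim_equal_count_closed_figures := by
  intro segments _
  unfold Spec_count_closed_figures count_closed_figures count_closed_figures_alt
  rw [pvBuild_eq]
  exact congrArg Prod.snd (pvFold (buildGraphA segments) (pvBuildClosed segments)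
    (2 * segments.length + 2)
    (by have := pvBuildLen segments; omega)
    (buildGraphA segments).keys (fun x hx => hx) (PySem.Set.empty, 0))
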